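-- pv_equiv track=rewrite | github.com/BackendSquid/AlgorithmChallenge | 입실퇴실/k.py | solution
-- ===== SOURCE A (Python) =====
-- def solution(enter, leave):
--     entered = set()
--
--     next_enter_index = 0
--     next_leave_index = 0
--
--     answer = [0] * len(enter)
--
--     def enter_person(person):
--         answer[person - 1] = len(entered)
--         for p in entered:
--             answer[p - 1] += 1
--         entered.add(person)
--
--     while next_leave_index < len(leave):
--         if len(entered) == 0:
--             entered.add(enter[next_enter_index])
--             next_enter_index += 1
--             continue
--         if leave[next_leave_index] in entered:
--             entered.remove(leave[next_leave_index])
--             next_leave_index += 1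
--             continue
--         if leave[next_leave_index] not in entered:
--             enter_person(enter[next_enter_index])
--             next_enter_index += 1
--
--     return answer
-- ===== SOURCE B (Python) =====
-- def solution(enter, leave):
--     # Instead of re-walking the whole room on every entry, keep a running
--     # enter-event counter; a person's greeting count is
--     # (occupancy when they entered) + (enter events while they were inside),
--     # i.e. start[p] + counter_at_leave with start[p] = occupancy - counter_at_entry.
--     inside = set()
--     start = {}
--     count = 0
--     next_enter = 0
--     next_leave = 0
--     answer = [0] * len(enter)
--
--     def admit():
--         nonlocal next_enter, count
--         person = enter[next_enter]
--         next_enter += 1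
--         start[person] = len(inside) - (count + 1)
--         inside.add(person)
--         count += 1
--
--     while next_leave < len(leave):
--         if not inside:
--             admit()
--         elif leave[next_leave] in inside:
--             person = leave[next_leave]
--             answer[person - 1] = start[person] + count
--             inside.remove(person)
--             next_leave += 1
--         else:
--             admit()
--
--     for person in inside:
--         answer[person - 1] = start[person] + count
--     return answer
-- ===== Notes on version B (the rewrite author's own statement) =====
-- stated objective: alternative
-- what changed: A re-scans the whole set of present people on every entry to hand out greetings one by one; B instead keeps a running enter-event counter and a per-person offset (occupancy minus counter at entry), so the inner scan over the room disappears and each event does constant work.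
-- outside the precondition, e.g. on solution([1, 1, 2], [2, 1]): A returns [3, 1, 0], B returns [2, 1, 0]; on solution([0, 2], [2, 0]): A returns [0, 2], B returns [0, 1]; on solution([5], [5]): A returns [0], B raises IndexError
import Mathlib
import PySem

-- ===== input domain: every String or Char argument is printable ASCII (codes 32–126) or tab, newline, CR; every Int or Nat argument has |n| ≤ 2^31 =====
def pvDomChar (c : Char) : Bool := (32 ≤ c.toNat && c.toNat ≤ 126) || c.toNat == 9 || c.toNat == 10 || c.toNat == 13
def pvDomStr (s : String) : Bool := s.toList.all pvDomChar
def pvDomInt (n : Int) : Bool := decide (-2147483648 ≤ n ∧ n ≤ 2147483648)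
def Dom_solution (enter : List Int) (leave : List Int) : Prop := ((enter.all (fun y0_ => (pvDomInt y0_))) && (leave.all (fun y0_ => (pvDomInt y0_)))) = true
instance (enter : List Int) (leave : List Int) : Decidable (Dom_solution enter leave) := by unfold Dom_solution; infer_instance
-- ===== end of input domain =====

-- B replaces A's per-entry rescan of everyone present with a running enter-event counter
-- and per-person offsets, doing constant work per event (objective: alternative).
-- ===== PORT A =====
-- answer[idx] += 1  (get then set; none = IndexError, negative idx wraps as in Python)
def pyIncAt? (ans : List Int) (idx : Int) : Option (List Int) :=
  match PySem.List.pyGet? ans idx with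
  | none => none
  | some v => PySem.List.pySet? ans idx (v + 1)

-- "for p in entered: answer[p - 1] += 1"  (increments commute, so Set order is irrelevant)
def incLoop : List Int → List Int → Option (List Int)
  | ans, [] => some ans
  | ans, p :: ps =>
    match pyIncAt? ans (p - 1) with
    | none => none
    | some a => incLoop a ps

-- A's inner "def enter_person(person)"
def enterPerson (answer : List Int) (entered : PySem.Set Int) (person : Int) :
    Option (List Int × PySem.Set Int) :=
  match PySem.List.pySet? answer (person - 1) ((entered.length : Int)) with
  | none => none
  | some a1 =>
    match incLoop a1 entered with
    | none => none
    | some a2 => some (a2, PySem.Set.add entered person)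

-- A's while loop; each iteration advances next_enter_index or next_leave_index, so
-- fuel = |enter| + |leave| + 1 is never exhausted before A returns or raises (none = raise).
def loopA (enter leave : List Int) : Nat → List Int → PySem.Set Int → Nat → Nat → Option (List Int)
  | 0, _, _, _, _ => none
  | fuel + 1, answer, entered, i, j =>
    if j < leave.length then
      if entered.length = 0 then
        match enter[i]? with
        | none => none
        | some p => loopA enter leave fuel answer (PySem.Set.add entered p) (i + 1) j
      else
        match leave[j]? with
        | none => none
        | some x =>
          if PySem.Set.contains entered x then
            match PySem.Set.remove? entered x with
            | none => none
            | some e => loopA enter leave fuel answer e i (j + 1)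
          else
            match enter[i]? with
            | none => none
            | some p =>
              match enterPerson answer entered p with
              | none => none
              | some (a, e) => loopA enter leave fuel a e (i + 1) j
    else some answer

def solution (enter : List Int) (leave : List Int) : List Int :=
  (loopA enter leave (enter.length + leave.length + 1)
    (List.replicate enter.length 0) PySem.Set.empty 0 0).getD []

-- ===== PORT B =====
-- Source B's "admit()": record start[p] = occupancy - (count+1), add p, bump the counter
def admitB (enter : List Int) (inside : PySem.Set Int) (start : PySem.Dict Int Int)
    (count : Int) (i : Nat) :
    Option (PySem.Set Int × PySem.Dict Int Int × Int × Nat) :=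
  match enter[i]? with
  | none => none
  | some p =>
    some (PySem.Set.add inside p, start.insert p ((inside.length : Int) - (count + 1)),
          count + 1, i + 1)

-- Source B's final "for person in inside: answer[person-1] = start[person] + count"
def finalizeB : List Int → List Int → PySem.Dict Int Int → Int → Option (List Int)
  | ans, [], _, _ => some ans
  | ans, p :: ps, start, count =>
    match start.get? p with
    | none => none
    | some s =>
      match PySem.List.pySet? ans (p - 1) (s + count) with
      | none => none
      | some a => finalizeB a ps start count

def loopB (enter leave : List Int) :
    Nat → List Int → PySem.Set Int → PySem.Dict Int Int → Int → Nat → Nat → Option (List Int)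
  | 0, _, _, _, _, _, _ => none
  | fuel + 1, answer, inside, start, count, i, j =>
    if j < leave.length then
      if inside.length = 0 then
        match admitB enter inside start count i with
        | none => none
        | some (ins, st, c, i') => loopB enter leave fuel answer ins st c i' j
      else
        match leave[j]? with
        | none => none
        | some x =>
          if PySem.Set.contains inside x then
            match start.get? x with
            | none => none
            | some s =>
              match PySem.List.pySet? answer (x - 1) (s + count) with
              | none => none
              | some a =>
                match PySem.Set.remove? inside x with
                | none => none
                | some ins => loopB enter leave fuel a ins start count i (j + 1)
          else
            match admitB enter inside start count i with
            | none => none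
            | some (ins, st, c, i') => loopB enter leave fuel answer ins st c i' j
    else finalizeB answer inside start count

def solution_alt (enter : List Int) (leave : List Int) : List Int :=
  (loopB enter leave (enter.length + leave.length + 1)
    (List.replicate enter.length 0) PySem.Set.empty PySem.Dict.empty 0 0 0).getD []

-- ===== PRECONDITION & SPEC =====
-- First disjunct: the challenge's natural domain — distinct person ids 1..n entering,
-- distinct leavers drawn from them. Second disjunct: degenerate runs in which everyone
-- leaves immediately (leave is a prefix of enter), where A returns all zeros whatever the
-- ids are. Outside both, A either raises IndexError (it runs out of enter events, or a
-- greeting indexes past the answer list) or, via duplicate ids / negative-index wraparound,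
-- returns accidental double-greeting values that are artefacts of its bookkeeping.
def Pre_solution (enter : List Int) (leave : List Int) : Prop :=
  (enter.Nodup ∧ leave.Nodup ∧
    (∀ p ∈ enter, 1 ≤ p ∧ p ≤ (enter.length : Int)) ∧ (∀ x ∈ leave, x ∈ enter)) ∨
  (leave.IsPrefix enter ∧
    ∀ x ∈ leave, 1 - (enter.length : Int) ≤ x ∧ x ≤ (enter.length : Int))
instance (enter : List Int) (leave : List Int) : Decidable (Pre_solution enter leave) := by
  unfold Pre_solution; infer_instance

def pvWitness_solution : List Int × List Int := ([2, 1, 3], [1, 3, 2])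

def Spec_solution (enter : List Int) (leave : List Int) (out : List Int) : Prop := out = solution_alt enter leave
instance (enter : List Int) (leave : List Int) (out : List Int) : Decidable (Spec_solution enter leave out) := by unfold Spec_solution; infer_instance

-- ===== CLAIM (what is proved, stated in full; the proofs are below) =====
def Claim_equal_solution : Prop := ∀ (enter : List Int) (leave : List Int), Dom_solution enter leave → Pre_solution enter leave → Spec_solution enter leave (solution enter leave)

-- ===== LEMMAS AND PROOFS =====

-- The coupling invariant between A's loop state and B's loop state
-- (both loops carry the same 'entered' set; ansA is A's answer array, ansB B's).
def CInv (enter ansA ansB : List Int) (entered : List Int)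
    (start : PySem.Dict Int Int) (count : Int) (i : Nat) : Prop :=
  ansA.length = enter.length ∧ ansB.length = enter.length ∧ entered.Nodup ∧
  (∀ q ∈ entered, q ∈ enter.take i) ∧
  (∀ q ∈ entered, ∃ s, start.get? q = some s ∧ ansA[(q - 1).toNat]? = some (s + count)) ∧
  (∀ k : Nat, ((k : Int) + 1) ∉ entered → ansA[k]? = ansB[k]?) ∧
  (∀ p ∈ enter.drop i, ansA[(p - 1).toNat]? = some 0)

lemma pySet?_of {xs : List Int} {i : Int} (v : Int) (h0 : 0 ≤ i) (h1 : i < xs.length) :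
    PySem.List.pySet? xs i v = some (xs.set i.toNat v) := by
  unfold PySem.List.pySet? PySem.List.pyIdx?
  rw [if_pos h0, if_pos h1]; rfl

lemma pyGet?_of {xs : List Int} {i : Int} (h0 : 0 ≤ i) (h1 : i < xs.length) :
    PySem.List.pyGet? xs i = xs[i.toNat]? := by
  unfold PySem.List.pyGet? PySem.List.pyIdx?
  rw [if_pos h0, if_pos h1]; rfl

lemma take_drop_disj {enter : List Int} (h : enter.Nodup) {q : Int} {i : Nat}
    (h1 : q ∈ enter.take i) (h2 : q ∈ enter.drop i) : False := by
  have he := enter.take_append_drop i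
  rw [← he] at h
  exact (List.disjoint_of_nodup_append h) h1 h2

lemma mem_take_succ {l : List Int} {i : Nat} {x : Int} (h : x ∈ l.take i) :
    x ∈ l.take (i + 1) := by
  rw [List.take_add_one]; exact List.mem_append_left _ h

lemma mem_drop_of_succ {l : List Int} {i : Nat} {x : Int} (h : x ∈ l.drop (i + 1)) :
    x ∈ l.drop i := by
  have h2 : l.drop (i + 1) = (l.drop i).drop 1 := by rw [List.drop_drop, Nat.add_comm]
  exact List.mem_of_mem_drop (h2 ▸ h)

lemma mem_drop_of_getElem? {l : List Int} {i : Nat} {x : Int} (h : l[i]? = some x) :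
    x ∈ l.drop i := by
  have h0 : (l.drop i)[0]? = some x := by rw [List.getElem?_drop]; simpa using h
  exact List.mem_of_getElem? h0

lemma mem_take_succ_of_getElem? {l : List Int} {i : Nat} {x : Int} (h : l[i]? = some x) :
    x ∈ l.take (i + 1) := by
  have h0 : (l.take (i + 1))[i]? = some x := by
    rw [List.getElem?_take_of_lt (by omega)]; exact h
  exact List.mem_of_getElem? h0

lemma nodup_append_singleton {l : List Int} (h : l.Nodup) {x : Int} (hx : x ∉ l) :
    (l ++ [x]).Nodup := by
  simp only [List.nodup_append, List.nodup_cons]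
  exact ⟨h, by simp, fun a ha b hb => by
    simp only [List.mem_singleton] at hb; subst hb; exact fun e => hx (e ▸ ha)⟩

-- A's inner greeting loop adds one at every present person's slot and nowhere else.
lemma incLoop_spec {n : Nat} :
    ∀ (l a : List Int), a.length = n → l.Nodup → (∀ q ∈ l, 1 ≤ q ∧ q ≤ (n : Int)) →
    ∃ a', incLoop a l = some a' ∧ a'.length = n ∧
      ∀ k : Nat, a'[k]? = if ((k : Int) + 1) ∈ l then (a[k]?).map (· + 1) else a[k]?
  | [], a, ha, _, _ => ⟨a, rfl, ha, by simp⟩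
  | q :: qs, a, ha, hnd, hrg => by
    obtain ⟨hq1, hq2⟩ := hrg q (List.mem_cons_self ..)
    have hlt : (q - 1).toNat < a.length := by omega
    have hget : a[(q - 1).toNat]? = some a[(q - 1).toNat] := List.getElem?_eq_getElem hlt
    obtain ⟨a', hrec, hlen, hspec⟩ := incLoop_spec qs (a.set (q - 1).toNat (a[(q - 1).toNat] + 1))
      (by simpa using ha) hnd.of_cons (fun p hp => hrg p (List.mem_cons_of_mem _ hp))
    have hinc : pyIncAt? a (q - 1) = some (a.set (q - 1).toNat (a[(q - 1).toNat] + 1)) := by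
      unfold pyIncAt?
      rw [pyGet?_of (by omega) (by omega), hget]
      dsimp only
      rw [pySet?_of _ (by omega) (by omega)]
    refine ⟨a', ?_, hlen, ?_⟩
    · simp only [incLoop, hinc]
      exact hrec
    · intro k
      rcases eq_or_ne k (q - 1).toNat with hk | hk
      · subst hk
        have hkq : ((q - 1).toNat : Int) + 1 = q := by omega
        have hknotqs : ((q - 1).toNat : Int) + 1 ∉ qs := by
          rw [hkq]; exact (List.nodup_cons.mp hnd).1
        rw [hspec, if_neg hknotqs, if_pos (by rw [hkq]; exact List.mem_cons_self ..),
          List.getElem?_set, if_pos (show (q - 1).toNat = (q - 1).toNat from rfl),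
          if_pos hlt, hget]
        rfl
      · have hne : ((k : Int) + 1) ≠ q := fun e => hk (by omega)
        have hset : (a.set (q - 1).toNat (a[(q - 1).toNat] + 1))[k]? = a[k]? := by
          rw [List.getElem?_set,
            if_neg (show ¬((q - 1).toNat = k) from fun e => hk e.symm)]
        rw [hspec, hset]
        by_cases hm : ((k : Int) + 1) ∈ qs
        · rw [if_pos hm, if_pos (List.mem_cons.mpr (Or.inr hm))]
        · rw [if_neg hm, if_neg (fun hmem => by
            rcases List.mem_cons.mp hmem with h | h
            · exact hne h
            · exact hm h)]

-- A's enter_person: sets the newcomer's slot to the occupancy, adds one to everyone present.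
lemma enterPerson_spec {n : Nat} {answer entered : List Int} {person : Int}
    (ha : answer.length = n) (hnd : entered.Nodup)
    (hrg : ∀ q ∈ entered, 1 ≤ q ∧ q ≤ (n : Int))
    (hp1 : 1 ≤ person) (hp2 : person ≤ (n : Int)) (hnew : person ∉ entered) :
    ∃ a2, enterPerson answer entered person = some (a2, entered ++ [person]) ∧
      a2.length = n ∧
      ∀ k : Nat, a2[k]? =
        if ((k : Int) + 1) = person then some (entered.length : Int)
        else if ((k : Int) + 1) ∈ entered then (answer[k]?).map (· + 1) else answer[k]? := by
  have hlt : (person - 1).toNat < answer.length := by omega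
  obtain ⟨a2, hrec, hlen, hspec⟩ := incLoop_spec entered
    (answer.set (person - 1).toNat ((entered.length : Int)))
    (by simpa using ha) hnd hrg
  have hadd : PySem.Set.add entered person = entered ++ [person] := by
    unfold PySem.Set.add PySem.Set.contains
    rw [if_neg (by simp [hnew])]
  refine ⟨a2, ?_, hlen, ?_⟩
  · unfold enterPerson
    rw [pySet?_of _ (by omega) (by omega)]
    dsimp only
    rw [hrec]
    dsimp only
    rw [hadd]
  · intro k
    rcases eq_or_ne k (person - 1).toNat with hk | hk
    · subst hk
      have hkq : (((person - 1).toNat : Int)) + 1 = person := by omega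
      rw [hspec, if_neg (by rw [hkq]; exact hnew), if_pos hkq,
        List.getElem?_set, if_pos (show (person - 1).toNat = (person - 1).toNat from rfl),
        if_pos hlt]
    · have hne : ((k : Int) + 1) ≠ person := fun e => hk (by omega)
      have hset : (answer.set (person - 1).toNat ((entered.length : Int)))[k]? = answer[k]? := by
        rw [List.getElem?_set,
          if_neg (show ¬((person - 1).toNat = k) from fun e => hk e.symm)]
      rw [hspec, hset, if_neg hne]

-- B's closing pass rewrites exactly the slots of the people still inside to A's values.
lemma finalize_spec {ansA : List Int} {start : PySem.Dict Int Int} {count : Int} :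
    ∀ (entered ansB : List Int), ansB.length = ansA.length →
    (∀ q ∈ entered, 1 ≤ q ∧ q ≤ (ansA.length : Int)) →
    (∀ q ∈ entered, ∃ s, start.get? q = some s ∧ ansA[(q - 1).toNat]? = some (s + count)) →
    (∀ k : Nat, ((k : Int) + 1) ∉ entered → ansA[k]? = ansB[k]?) →
    finalizeB ansB entered start count = some ansA
  | [], ansB, hlen, _, _, hE => by
    show some ansB = some ansA
    exact congrArg some (List.ext_getElem?_iff.mpr (fun k => (hE k (by simp)).symm))
  | q :: qs, ansB, hlen, hrg, hmem, hE => by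
    obtain ⟨hq1, hq2⟩ := hrg q (List.mem_cons_self ..)
    obtain ⟨s, hgs, hval⟩ := hmem q (List.mem_cons_self ..)
    have hlt : (q - 1).toNat < ansB.length := by omega
    unfold finalizeB
    rw [hgs]
    dsimp only
    rw [pySet?_of _ (by omega) (by omega)]
    dsimp only
    refine finalize_spec qs _ (by simpa using hlen)
      (fun p hp => hrg p (List.mem_cons_of_mem _ hp))
      (fun p hp => hmem p (List.mem_cons_of_mem _ hp)) (fun k hk => ?_)
    rcases eq_or_ne k (q - 1).toNat with hkq | hkq
    · subst hkq
      rw [List.getElem?_set, if_pos (show (q - 1).toNat = (q - 1).toNat from rfl),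
        if_pos hlt]
      exact hval
    · rw [List.getElem?_set, if_neg (show ¬((q - 1).toNat = k) from fun e => hkq e.symm)]
      refine hE k (fun hm => ?_)
      rcases List.mem_cons.mp hm with h | h
      · exact hkq (by omega)
      · exact hk h

-- Main coupling lemma: with the invariant, the two loops return the same Option value.
lemma loop_eq (enter leave : List Int) (Hnd : enter.Nodup)
    (Hrg : ∀ p ∈ enter, 1 ≤ p ∧ p ≤ (enter.length : Int)) :
    ∀ (fuel : Nat) (ansA ansB entered : List Int) (start : PySem.Dict Int Int)
      (count : Int) (i j : Nat),
      CInv enter ansA ansB entered start count i →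
      loopA enter leave fuel ansA entered i j = loopB enter leave fuel ansB entered start count i j := by
  intro fuel
  induction fuel with
  | zero => intro _ _ _ _ _ _ _ _; rfl
  | succ fuel ih =>
    intro ansA ansB entered start count i j hinv
    obtain ⟨hL1, hL2, hN, hM, hMem, hE, hZ⟩ := hinv
    have hrgEnt : ∀ q ∈ entered, 1 ≤ q ∧ q ≤ (enter.length : Int) :=
      fun q hq => Hrg q (List.take_subset _ _ (hM q hq))
    simp only [loopA, loopB]
    by_cases hj : j < leave.length
    · rw [if_pos hj, if_pos hj]
      by_cases hemp : entered.length = 0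
      · -- empty room: both admit the next enterer
        have hent : entered = [] := List.length_eq_zero_iff.mp hemp
        subst hent
        rw [if_pos hemp, if_pos hemp]
        simp only [admitB]
        cases henter : enter[i]? with
        | none => rfl
        | some p =>
          dsimp only
          have hpdrop : p ∈ enter.drop i := mem_drop_of_getElem? henter
          have hpmem : p ∈ enter := List.mem_of_getElem? henter
          have hptake : p ∈ enter.take (i + 1) := mem_take_succ_of_getElem? henter
          obtain ⟨hp1, hp2⟩ := Hrg p hpmem
          have hadd : PySem.Set.add ([] : List Int) p = [p] := rfl
          rw [hadd]
          refine ih ansA ansB [p] _ _ _ _ ?_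
          refine ⟨hL1, hL2, by simp, ?_, ?_, ?_, ?_⟩
          · intro q hq; rw [List.mem_singleton.mp hq]; exact hptake
          · intro q hq; rw [List.mem_singleton.mp hq]
            refine ⟨(([] : List Int).length : Int) - (count + 1), ?_, ?_⟩
            · rw [PySem.Dict.get?_insert, if_pos rfl]
            · rw [hZ p hpdrop]; congr 1; simp
          · intro k _
            exact hE k (by simp)
          · intro q hq
            exact hZ q (mem_drop_of_succ hq)
      · rw [if_neg hemp, if_neg hemp]
        cases hx : leave[j]? with
        | none => rfl
        | some x =>
          dsimp only
          by_cases hcont : PySem.Set.contains entered x = true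
          · -- x is inside: A removes it, B writes its final count and removes it
            rw [if_pos hcont, if_pos hcont]
            have hxmem : x ∈ entered := by
              simpa [PySem.Set.contains, List.contains_iff_mem] using hcont
            obtain ⟨hx1, hx2⟩ := hrgEnt x hxmem
            obtain ⟨s, hgs, hval⟩ := hMem x hxmem
            have hlt : (x - 1).toNat < ansB.length := by omega
            have hrem : PySem.Set.remove? entered x =
                some (entered.filter (fun y => !y == x)) := by
              unfold PySem.Set.remove?
              rw [if_pos hcont]; rfl
            rw [hrem, hgs]
            dsimp only
            rw [pySet?_of _ (by omega) (by omega)]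
            dsimp only
            refine ih ansA _ _ start count i (j + 1) ?_
            refine ⟨hL1, by simpa using hL2, hN.filter _,
              fun q hq => hM q (List.mem_of_mem_filter hq),
              fun q hq => hMem q (List.mem_of_mem_filter hq), ?_, hZ⟩
            intro k hk
            rcases eq_or_ne k (x - 1).toNat with hkq | hkq
            · subst hkq
              rw [List.getElem?_set, if_pos (show (x - 1).toNat = (x - 1).toNat from rfl),
                if_pos hlt]
              exact hval
            · rw [List.getElem?_set, if_neg (show ¬((x - 1).toNat = k) from fun e => hkq e.symm)]
              refine hE k (fun hm => ?_)
              have hne : ((k : Int) + 1) ≠ x := fun e => hkq (by omega)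
              exact hk (List.mem_filter.mpr ⟨hm, by simpa using hne⟩)
          · -- x not inside: both admit the next enterer
            rw [if_neg hcont, if_neg hcont]
            simp only [admitB]
            cases henter : enter[i]? with
            | none => rfl
            | some p =>
              dsimp only
              have hpdrop : p ∈ enter.drop i := mem_drop_of_getElem? henter
              have hpmem : p ∈ enter := List.mem_of_getElem? henter
              have hptake : p ∈ enter.take (i + 1) := mem_take_succ_of_getElem? henter
              obtain ⟨hp1, hp2⟩ := Hrg p hpmem
              have hnew : p ∉ entered := fun hin => take_drop_disj Hnd (hM p hin) hpdrop
              obtain ⟨a2, hep, hlen2, hspec⟩ :=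
                enterPerson_spec hL1 hN hrgEnt hp1 hp2 hnew
              have hadd : PySem.Set.add entered p = entered ++ [p] := by
                unfold PySem.Set.add PySem.Set.contains
                rw [if_neg (by simp [hnew])]
              rw [hep, hadd]
              dsimp only
              refine ih a2 ansB (entered ++ [p]) _ _ _ _ ?_
              refine ⟨hlen2, hL2, nodup_append_singleton hN hnew, ?_, ?_, ?_, ?_⟩
              · intro q hq
                rcases List.mem_append.mp hq with h | h
                · exact mem_take_succ (hM q h)
                · rw [List.mem_singleton.mp h]; exact hptake
              · intro q hq
                rcases List.mem_append.mp hq with h | h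
                · obtain ⟨s, hgs, hval⟩ := hMem q h
                  have hqp : q ≠ p := fun e => hnew (e ▸ h)
                  refine ⟨s, by rw [PySem.Dict.get?_insert, if_neg hqp]; exact hgs, ?_⟩
                  have hq1 := (hrgEnt q h).1
                  rw [hspec, if_neg (by omega),
                    if_pos (by rw [show ((q - 1).toNat : Int) + 1 = q by omega]; exact h), hval]
                  show some (s + count + 1) = some (s + (count + 1))
                  congr 1; ring
                · rw [List.mem_singleton.mp h]
                  refine ⟨(entered.length : Int) - (count + 1),
                    by rw [PySem.Dict.get?_insert, if_pos rfl], ?_⟩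
                  rw [hspec, if_pos (by omega)]
                  congr 1; ring
              · intro k hk
                rw [List.mem_append, List.mem_singleton] at hk
                push Not at hk
                rw [hspec, if_neg hk.2, if_neg hk.1]
                exact hE k hk.1
              · intro q hq
                have hqdropi : q ∈ enter.drop i := mem_drop_of_succ hq
                have hq1 := (Hrg q (List.mem_of_mem_drop hqdropi)).1
                have hqp : q ≠ p := fun e => take_drop_disj Hnd (e ▸ hptake) hq
                have hqent : q ∉ entered := fun hin => take_drop_disj Hnd (hM q hin) hqdropi
                rw [hspec,
                  if_neg (by rw [show ((q - 1).toNat : Int) + 1 = q by omega]; exact hqp),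
                  if_neg (by rw [show ((q - 1).toNat : Int) + 1 = q by omega]; exact hqent)]
                exact hZ q hqdropi
    · rw [if_neg hj, if_neg hj]
      refine (finalize_spec entered ansB (hL2.trans hL1.symm)
        (fun q hq => ?_) hMem hE).symm
      rw [hL1]; exact hrgEnt q hq

lemma pySet?_replicate_zero {n : Nat} {x v : Int} (h1 : -(n : Int) ≤ x) (h2 : x < (n : Int))
    (hv : v = 0) :
    PySem.List.pySet? (List.replicate n (0 : Int)) x v = some (List.replicate n 0) := by
  subst hv
  unfold PySem.List.pySet? PySem.List.pyIdx?
  rw [List.length_replicate]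
  split_ifs <;> simp [List.set_replicate_self]

-- When leave is a prefix of enter, every person leaves the moment they entered:
-- both loops alternate admit/remove and neither ever changes the all-zero answer.
lemma prefix_loop (leave tail : List Int)
    (hrg : ∀ x ∈ leave, 1 - ((leave ++ tail).length : Int) ≤ x ∧
      x ≤ ((leave ++ tail).length : Int)) :
    ∀ (fuel : Nat) (start : PySem.Dict Int Int) (count : Int) (j : Nat),
      loopA (leave ++ tail) leave fuel (List.replicate (leave ++ tail).length 0) [] j j =
      loopB (leave ++ tail) leave fuel (List.replicate (leave ++ tail).length 0) []
        start count j j := by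
  intro fuel
  induction fuel using Nat.strong_induction_on with
  | _ fuel ih =>
    intro start count j
    rcases fuel with _ | m
    · rfl
    simp only [loopA, loopB]
    by_cases hj : j < leave.length
    · rw [if_pos hj, if_pos hj]
      have h0 : (([] : List Int)).length = 0 := rfl
      rw [if_pos h0, if_pos h0]
      have hx : leave[j]? = some leave[j] := List.getElem?_eq_getElem hj
      have henter : (leave ++ tail)[j]? = some leave[j] := by
        rw [List.getElem?_append_left hj]; exact hx
      simp only [admitB]
      rw [henter]
      dsimp only
      obtain ⟨hb1, hb2⟩ := hrg leave[j] (List.getElem_mem hj)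
      rcases m with _ | k
      · rfl
      simp only [loopA, loopB]
      rw [if_pos hj, if_pos hj]
      have hne : ¬((PySem.Set.add ([] : List Int) leave[j]).length = 0) := by
        simp [PySem.Set.add, PySem.Set.contains]
      rw [if_neg hne, if_neg hne, hx]
      dsimp only
      have hadd : PySem.Set.add ([] : List Int) leave[j] = [leave[j]] := rfl
      rw [hadd]
      have hcont : PySem.Set.contains [leave[j]] leave[j] = true := by
        simp [PySem.Set.contains]
      have hrem : PySem.Set.remove? [leave[j]] leave[j] = some [] := by
        simp [PySem.Set.remove?, PySem.Set.contains, PySem.Set.discard]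
      have hget : (start.insert leave[j]
          (((([] : List Int)).length : Int) - (count + 1))).get? leave[j] =
          some (((([] : List Int)).length : Int) - (count + 1)) := by
        rw [PySem.Dict.get?_insert, if_pos rfl]
      rw [if_pos hcont, if_pos hcont, hrem]
      dsimp only
      rw [hget]
      dsimp only
      rw [pySet?_replicate_zero (by omega) (by omega)
        (by simp only [List.length_nil, Nat.cast_zero]; ring)]
      dsimp only
      exact ih k (by omega) _ (count + 1) (j + 1)
    · rw [if_neg hj, if_neg hj]; rfl

-- ===== VERDICT (by name: the statement is the Claim_ definition above) =====
theorem solution_spec : Claim_equal_solution := by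
  intro enter leave _ hpre
  show solution enter leave = solution_alt enter leave
  rcases hpre with ⟨hnd, _, hrg, _⟩ | ⟨hpref, hrg⟩
  case inr =>
    obtain ⟨tail, rfl⟩ := hpref
    unfold solution solution_alt
    rw [show (PySem.Set.empty : PySem.Set Int) = [] from rfl,
      prefix_loop leave tail hrg]
  unfold solution solution_alt
  rw [loop_eq enter leave hnd hrg _ _ _ _ _ _ _ _ ?_]
  refine ⟨by simp, by simp, by simp [PySem.Set.empty], by simp [PySem.Set.empty],
    by simp [PySem.Set.empty], by simp [PySem.Set.empty], ?_⟩
  intro p hp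
  obtain ⟨hp1, hp2⟩ := hrg p (by simpa using hp)
  rw [List.getElem?_replicate, if_pos (by omega)]
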